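-- pv_equiv track=rewrite | github.com/VRCMF/LangEdit | glue_eval/useful_functions.py | get_sublist_xnli
-- ===== SOURCE A (Python) =====
-- def get_sublist_xnli(elements, number_of_few_shots):
--         sublist = []
--
--         # 找到第一个 label 为 0 的元素
--         for element in elements:
--             if element['label'] == 'not_entailment':
--                 sublist.append(element)
--                 break
--
--         # 找到第一个 label 为 1 的元素
--         for element in elements:
--             if element['label'] == 'entailment':
--                 sublist.append(element)
--                 break
--
--         return sublist
-- ===== SOURCE B (Python) =====
-- def get_sublist_xnli(elements, number_of_few_shots):
--     # One pass: index the first element seen for each label, then emit in fixed order.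
--     first = {}
--     for element in elements:
--         first.setdefault(element['label'], element)
--     sublist = []
--     if 'not_entailment' in first:
--         sublist.append(first['not_entailment'])
--     if 'entailment' in first:
--         sublist.append(first['entailment'])
--     return sublist
-- ===== Notes on version B (the rewrite author's own statement) =====
-- stated objective: alternative
-- what changed: Replaces A's two sequential break-on-first scans by a single pass that builds a label->first-element index with dict.setdefault and then emits the two fixed labels by lookup.
import Mathlib
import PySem

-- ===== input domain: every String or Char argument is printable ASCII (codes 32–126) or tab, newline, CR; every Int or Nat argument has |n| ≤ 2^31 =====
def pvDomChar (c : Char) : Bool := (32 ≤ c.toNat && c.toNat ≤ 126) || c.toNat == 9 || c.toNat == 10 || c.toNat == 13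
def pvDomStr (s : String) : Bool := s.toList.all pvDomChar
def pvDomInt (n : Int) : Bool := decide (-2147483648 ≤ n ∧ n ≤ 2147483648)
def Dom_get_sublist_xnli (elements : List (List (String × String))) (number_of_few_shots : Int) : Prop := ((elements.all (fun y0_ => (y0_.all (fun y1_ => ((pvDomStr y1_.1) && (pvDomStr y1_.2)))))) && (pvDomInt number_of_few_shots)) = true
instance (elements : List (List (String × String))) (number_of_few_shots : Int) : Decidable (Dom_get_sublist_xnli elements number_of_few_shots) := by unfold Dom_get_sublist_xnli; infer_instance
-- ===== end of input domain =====

-- B replaces A's two break-on-first scans by one setdefault-indexing pass plus two fixed-order lookups (alternative decomposition, same cost).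

-- element['label']: exact wherever the element carries a 'label' key (guaranteed by Pre_; Python raises KeyError otherwise — "" is only a totalizing default, never matched)
def pvLabelD (e : List (String × String)) : String := (PySem.Dict.mk e).getD "label" ""

-- ===== PORT A =====
-- "for element in elements: if element['label'] == lab: append; break" — first matching element
def pvFirstLabeled (lab : String) : List (List (String × String)) → Option (List (String × String))
  | [] => none
  | e :: rest => if pvLabelD e == lab then some e else pvFirstLabeled lab rest

def get_sublist_xnli (elements : List (List (String × String))) (number_of_few_shots : Int) : List (List (String × String)) :=
  let sublist : List (List (String × String)) := []
  let sublist := match pvFirstLabeled "not_entailment" elements with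
    | some e => sublist ++ [e]
    | none => sublist
  match pvFirstLabeled "entailment" elements with
    | some e => sublist ++ [e]
    | none => sublist

-- ===== PORT B =====
def get_sublist_xnli_alt (elements : List (List (String × String))) (number_of_few_shots : Int) : List (List (String × String)) :=
  let first := elements.foldl (fun d e => d.setdefault (pvLabelD e) e) PySem.Dict.empty
  let sublist : List (List (String × String)) := []
  let sublist := if first.contains "not_entailment" then sublist ++ [first.getD "not_entailment" []] else sublist
  if first.contains "entailment" then sublist ++ [first.getD "entailment" []] else sublist

-- ===== PRECONDITION & SPEC =====
-- Pre_ excludes inputs where some element lacks a 'label' key: Python A raises KeyError on every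
-- such element it reaches (and B always does), so the only excluded inputs on which A still
-- returns are those where both scans break before the labelless element.
def Pre_get_sublist_xnli (elements : List (List (String × String))) (number_of_few_shots : Int) : Prop :=
  ∀ e ∈ elements, "label" ∈ e.map Prod.fst
instance (elements : List (List (String × String))) (number_of_few_shots : Int) : Decidable (Pre_get_sublist_xnli elements number_of_few_shots) := by unfold Pre_get_sublist_xnli; infer_instance

def pvWitness_get_sublist_xnli : (List (List (String × String))) × Int :=
  ([[("label", "not_entailment")], [("label", "entailment")]], 0)

def Spec_get_sublist_xnli (elements : List (List (String × String))) (number_of_few_shots : Int) (out : List (List (String × String))) : Prop := out = get_sublist_xnli_alt elements number_of_few_shots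
instance (elements : List (List (String × String))) (number_of_few_shots : Int) (out : List (List (String × String))) : Decidable (Spec_get_sublist_xnli elements number_of_few_shots out) := by unfold Spec_get_sublist_xnli; infer_instance

-- ===== CLAIM (what is proved, stated in full; the proofs are below) =====
def Claim_equal_get_sublist_xnli : Prop := ∀ (elements : List (List (String × String))) (number_of_few_shots : Int), Dom_get_sublist_xnli elements number_of_few_shots → Pre_get_sublist_xnli elements number_of_few_shots → Spec_get_sublist_xnli elements number_of_few_shots (get_sublist_xnli elements number_of_few_shots)

-- ===== LEMMAS AND PROOFS =====

-- the setdefault loop indexes the FIRST element of each label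
lemma get?_fold_setdefault (lab : String) (elements : List (List (String × String)))
    (d : PySem.Dict String (List (String × String))) :
    (elements.foldl (fun d e => d.setdefault (pvLabelD e) e) d).get? lab =
      match d.get? lab with
      | some v => some v
      | none => pvFirstLabeled lab elements := by
  induction elements generalizing d with
  | nil => cases h : d.get? lab <;> simp [pvFirstLabeled, h]
  | cons e rest ih =>
    simp only [List.foldl_cons, ih, pvFirstLabeled]
    by_cases hl : pvLabelD e == lab
    · have hlab : pvLabelD e = lab := by simpa using hl
      subst hlab
      by_cases hc : d.contains (pvLabelD e) = true
      · rw [PySem.Dict.setdefault_of_contains (h := hc)]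
        rw [PySem.Dict.contains_eq_isSome_get?] at hc
        cases h : d.get? (pvLabelD e) with
        | none => simp [h] at hc
        | some v => simp [h]
      · rw [PySem.Dict.setdefault_of_not_contains (h := by simpa using hc)]
        rw [PySem.Dict.contains_eq_isSome_get?] at hc
        cases h : d.get? (pvLabelD e) with
        | none => simp [PySem.Dict.get?_insert_self, h]
        | some v => simp [h] at hc
    · have hne : lab ≠ pvLabelD e := fun h => by simp [h] at hl
      by_cases hc : d.contains (pvLabelD e) = true
      · rw [PySem.Dict.setdefault_of_contains (h := hc)]
        cases h : d.get? lab <;> simp [h, hl]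
      · rw [PySem.Dict.setdefault_of_not_contains (h := by simpa using hc),
            PySem.Dict.get?_insert_of_ne (hne := hne)]
        cases h : d.get? lab <;> simp [h, hl]

lemma get?_first (lab : String) (elements : List (List (String × String))) :
    (elements.foldl (fun d e => d.setdefault (pvLabelD e) e)
        (PySem.Dict.empty : PySem.Dict String (List (String × String)))).get? lab =
      pvFirstLabeled lab elements := by
  rw [get?_fold_setdefault]
  simp [PySem.Dict.get?_empty]

-- ===== VERDICT (by name: the statement is the Claim_ definition above) =====
theorem get_sublist_xnli_spec : Claim_equal_get_sublist_xnli := by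
  intro elements number_of_few_shots _ _
  have h1 := get?_first "not_entailment" elements
  have h2 := get?_first "entailment" elements
  cases hA : pvFirstLabeled "not_entailment" elements <;>
    cases hB : pvFirstLabeled "entailment" elements <;>
      simp [Spec_get_sublist_xnli, get_sublist_xnli, get_sublist_xnli_alt,
        PySem.Dict.contains_eq_isSome_get?, PySem.Dict.getD_eq_get?_getD,
        h1, h2, hA, hB]
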